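-- pv_equiv track=rewrite | github.com/981377660LMT/algorithm-study | 17_模式匹配/马拉车拉马/LongestPalindromes.py | longestPalindromesLength
-- ===== SOURCE A (Python) =====
-- from typing import List, Tuple
--
-- INF = int(1e18)
--
-- def longestPalindromesLength(ords: List[int]) -> List[int]:
--     """
--     对2*n-1个回文中心, 求出每个中心对应的极大回文子串的长度.
--     """
--     n = len(ords)
--     res = [0] * (2 * n - 1)
--     palindromes = longestPalindromes(ords)
--     for p in palindromes:
--         s, e = p
--         res[s + e - 1] = e - s
--     return res
--
-- def longestPalindromes(ords: List[int]) -> List[Tuple[int, int]]: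
--     """
--     给定一个字符串，返回极长回文子串的区间.这样的极长回文子串最多有 2n-1 个.
--     """
--     n = len(ords)
--     m = n * 2 - 1
--     sb = [0] * m
--     for i in range(n - 1, -1, -1):
--         sb[i * 2] = ords[i]
--     for i in range(n - 1):
--         sb[i * 2 + 1] = INF
--     dp = [0] * m
--     i, j = 0, 0
--     while i < m:
--         while i - j >= 0 and i + j < m and sb[i - j] == sb[i + j]:
--             j += 1
--         dp[i] = j
--         k = 1
--         while i - k >= 0 and i + k < m and k + dp[i - k] < j:
--             dp[i + k] = dp[i - k]
--             k += 1
--         i += k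
--         j -= k
--     for i in range(m):
--         if ((i ^ dp[i]) & 1) == 0:
--             dp[i] -= 1
--     res = []
--     for i in range(m):
--         if dp[i] == 0:
--             continue
--         start = (i - dp[i] + 1) // 2
--         end = (i + dp[i] + 1) // 2
--         res.append((start, end))
--     return res
-- ===== SOURCE B (Python) =====
-- from typing import List
--
-- def longestPalindromesLength(ords: List[int]) -> List[int]:
--     """
--     对2*n-1个回文中心, 求出每个中心对应的极大回文子串的长度.
--     """
--     n = len(ords)
--     res = []
--     for c in range(2 * n - 1):
--         if c % 2 == 0:
--             l, r = c // 2, c // 2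
--         else:
--             l, r = c // 2, c // 2 + 1
--         while l >= 0 and r < n and ords[l] == ords[r]:
--             l -= 1
--             r += 1
--         res.append(r - l - 1)
--     return res
-- ===== Notes on version B (the rewrite author's own statement) =====
-- stated objective: simpler
-- what changed: Replaces Manacher's O(n) mirrored-radius algorithm (with INF separators, radius array, parity post-adjustment and interval reassembly) by direct naive center expansion: for each of the 2n-1 centers expand l,r outward while characters match and record r-l-1.
import Mathlib
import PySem

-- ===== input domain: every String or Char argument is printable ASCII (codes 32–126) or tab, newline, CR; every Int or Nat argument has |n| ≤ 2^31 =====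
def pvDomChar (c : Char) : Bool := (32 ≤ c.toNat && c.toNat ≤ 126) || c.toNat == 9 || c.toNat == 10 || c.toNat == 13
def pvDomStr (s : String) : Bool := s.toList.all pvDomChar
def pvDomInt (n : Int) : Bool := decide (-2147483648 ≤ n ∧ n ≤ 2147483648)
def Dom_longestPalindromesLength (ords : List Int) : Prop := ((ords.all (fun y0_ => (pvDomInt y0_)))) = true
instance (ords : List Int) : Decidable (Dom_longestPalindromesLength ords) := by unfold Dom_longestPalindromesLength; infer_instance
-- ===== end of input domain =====

-- B replaces Manacher's linear-time mirrored-radius computation by plain naive center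
-- expansion (simpler: no INF separators, no radius reuse, no parity post-processing);
-- return values are identical on all inputs.

-- ===== PORT A =====
-- Shared indexing helpers: every subscript both Pythons perform is in range, so the
-- `.getD 0` / `.toNat` defaults of these helpers are never exercised on a real run.
def pvGetI (xs : List Int) (i : Int) : Int := (PySem.List.pyGet? xs i).getD 0
def pvSetI (xs : List Int) (i : Int) (v : Int) : List Int := xs.set i.toNat v

def pvINF : Int := 1000000000000000000   -- INF = int(1e18)

-- inner `while i - j >= 0 and i + j < m and sb[i-j] == sb[i+j]: j += 1`
-- (fuel only totalizes the loop; it is provably sufficient, the `0` branch is never taken)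
def pvInnerGo (sb : List Int) (m i : Int) : Nat → Int → Int
  | 0, j => j
  | fuel + 1, j =>
    if 0 ≤ i - j ∧ i + j < m ∧ pvGetI sb (i - j) = pvGetI sb (i + j) then
      pvInnerGo sb m i fuel (j + 1)
    else j

def pvInner (sb : List Int) (m i j : Int) : Int :=
  pvInnerGo sb m i ((m - i - j).toNat + 1) j

-- `k = 1; while i - k >= 0 and i + k < m and k + dp[i-k] < j: dp[i+k] = dp[i-k]; k += 1`
def pvCopyGo (m i j : Int) : Nat → List Int → Int → List Int × Int
  | 0, dp, k => (dp, k)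
  | fuel + 1, dp, k =>
    if 0 ≤ i - k ∧ i + k < m ∧ k + pvGetI dp (i - k) < j then
      pvCopyGo m i j fuel (pvSetI dp (i + k) (pvGetI dp (i - k))) (k + 1)
    else (dp, k)

def pvCopy (m i j : Int) (dp : List Int) (k : Int) : List Int × Int :=
  pvCopyGo m i j ((m - i - k).toNat + 1) dp k

-- outer `while i < m` loop of Manacher
def pvOuterGo (sb : List Int) (m : Int) : Nat → List Int → Int → Int → List Int
  | 0, dp, _, _ => dp
  | fuel + 1, dp, i, j =>
    if i < m then
      let j1 := pvInner sb m i j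
      let dp1 := pvSetI dp i j1
      let p := pvCopy m i j1 dp1 1
      pvOuterGo sb m fuel p.1 (i + p.2) (j1 - p.2)
    else dp

def pvOuter (sb : List Int) (m : Int) (dp : List Int) (i j : Int) : List Int :=
  pvOuterGo sb m ((m - i).toNat + 1) dp i j

-- n = len(ords); m = n * 2 - 1
def pvNOf (ords : List Int) : Int := ords.length
def pvMOf (ords : List Int) : Int := pvNOf ords * 2 - 1

-- sb = [0]*m; the two filling loops (descending chars, then INF separators)
def pvSbOf (ords : List Int) : List Int :=
  (PySem.List.pyRange 0 (pvNOf ords - 1) 1).foldl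
    (fun sb i => pvSetI sb (i * 2 + 1) pvINF)
    ((PySem.List.pyRange (pvNOf ords - 1) (-1) (-1)).foldl
       (fun sb i => pvSetI sb (i * 2) (pvGetI ords i))
       (List.replicate (pvMOf ords).toNat 0))

-- dp after the main Manacher loop
def pvDpOf (ords : List Int) : List Int :=
  pvOuter (pvSbOf ords) (pvMOf ords) (List.replicate (pvMOf ords).toNat 0) 0 0

-- `for i in range(m): if ((i ^ dp[i]) & 1) == 0: dp[i] -= 1`
def pvDp2Of (ords : List Int) : List Int :=
  (PySem.List.pyRange 0 (pvMOf ords) 1).foldl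
    (fun dp i => if PySem.Int.band (PySem.Int.bxor i (pvGetI dp i)) 1 = 0 then
                   pvSetI dp i (pvGetI dp i - 1) else dp) (pvDpOf ords)

def longestPalindromes (ords : List Int) : List (Int × Int) :=
  (PySem.List.pyRange 0 (pvMOf ords) 1).foldl
    (fun res i => if pvGetI (pvDp2Of ords) i = 0 then res
                  else res ++ [(PySem.Int.floordiv (i - pvGetI (pvDp2Of ords) i + 1) 2,
                                PySem.Int.floordiv (i + pvGetI (pvDp2Of ords) i + 1) 2)]) []

def longestPalindromesLength (ords : List Int) : List Int :=
  (longestPalindromes ords).foldl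
    (fun res p => pvSetI res (p.1 + p.2 - 1) (p.2 - p.1))
    (List.replicate (2 * pvNOf ords - 1).toNat 0)

-- ===== PORT B =====
-- `while l >= 0 and r < n and ords[l] == ords[r]: l -= 1; r += 1`; returns r - l - 1
def pvExpandGo (ords : List Int) (n : Int) : Nat → Int → Int → Int
  | 0, l, r => r - l - 1
  | fuel + 1, l, r =>
    if 0 ≤ l ∧ r < n ∧ pvGetI ords l = pvGetI ords r then
      pvExpandGo ords n fuel (l - 1) (r + 1)
    else r - l - 1

def pvExpand (ords : List Int) (n l r : Int) : Int :=
  pvExpandGo ords n ((l + 1).toNat + 1) l r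

def longestPalindromesLength_alt (ords : List Int) : List Int :=
  let n : Int := ords.length
  (PySem.List.pyRange 0 (2 * n - 1) 1).foldl
    (fun res c =>
      res ++ [ if PySem.Int.mod c 2 = 0 then
                 pvExpand ords n (PySem.Int.floordiv c 2) (PySem.Int.floordiv c 2)
               else
                 pvExpand ords n (PySem.Int.floordiv c 2) (PySem.Int.floordiv c 2 + 1) ]) []

-- ===== PRECONDITION & SPEC =====
def Spec_longestPalindromesLength (ords : List Int) (out : List Int) : Prop := out = longestPalindromesLength_alt ords
instance (ords : List Int) (out : List Int) : Decidable (Spec_longestPalindromesLength ords out) := by unfold Spec_longestPalindromesLength; infer_instance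

-- ===== CLAIM (what is proved, stated in full; the proofs are below) =====
def Claim_equal_longestPalindromesLength : Prop := ∀ (ords : List Int), Dom_longestPalindromesLength ords → Spec_longestPalindromesLength ords (longestPalindromesLength ords)

-- ===== LEMMAS AND PROOFS =====

-- ===== base bridge lemmas =====
theorem pvGetI_pos (xs : List Int) (i : Int) (h0 : 0 ≤ i) (h1 : i < (xs.length : Int)) :
    pvGetI xs i = (xs[i.toNat]?).getD 0 := by
  simp [pvGetI, PySem.List.pyGet?, PySem.List.pyIdx?, h0, h1]

theorem pvGetI_set_self (xs : List Int) (a : Int) (v : Int) (h0 : 0 ≤ a) (h1 : a < (xs.length : Int)) :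
    pvGetI (pvSetI xs a v) a = v := by
  rw [pvSetI, pvGetI_pos _ _ h0 (by simp; omega)]
  rw [List.getElem?_set_self (by omega)]
  rfl

theorem pvGetI_set_ne (xs : List Int) (a : Int) (v : Int) (p : Int)
    (h0a : 0 ≤ a) (h0 : 0 ≤ p) (hne : p ≠ a) :
    pvGetI (pvSetI xs a v) p = pvGetI xs p := by
  by_cases h1a : a < (xs.length : Int)
  · by_cases h1 : p < (xs.length : Int)
    · rw [pvSetI, pvGetI_pos _ _ h0 (by simp; omega), pvGetI_pos _ _ h0 h1]
      rw [List.getElem?_set_ne (by omega)]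
    · simp only [pvGetI, pvSetI, PySem.List.pyGet?, PySem.List.pyIdx?, List.length_set]
      split_ifs <;> simp_all
  · rw [pvSetI, List.set_eq_of_length_le (by omega)]

theorem pvSetI_length (xs : List Int) (a v : Int) : (pvSetI xs a v).length = xs.length := by
  simp [pvSetI]

-- ===== Manacher radius function and its characterization =====
def pvMA (sb : List Int) (m i t : Int) : Prop :=
  0 ≤ i - t ∧ i + t < m ∧ pvGetI sb (i - t) = pvGetI sb (i + t)

def pvF (sb : List Int) (m i : Int) : Int := pvInner sb m i 0

theorem pvInnerGo_ge (sb : List Int) (m i : Int) :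
    ∀ (fuel : Nat) (j : Int), j ≤ pvInnerGo sb m i fuel j := by
  intro fuel
  induction fuel with
  | zero => intro j; simp [pvInnerGo]
  | succ fuel IH =>
    intro j
    rw [pvInnerGo]
    split_ifs with h
    · have := IH (j + 1); omega
    · omega

theorem pvInner_ge (sb : List Int) (m i j : Int) : j ≤ pvInner sb m i j :=
  pvInnerGo_ge sb m i _ j

theorem pvInnerGo_spec (sb : List Int) (m i : Int) :
    ∀ (fuel : Nat) (j : Int), (m - i - j).toNat < fuel → 0 ≤ j →
    (∀ t, 0 ≤ t → t < j → pvMA sb m i t) →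
    ((∀ t, 0 ≤ t → t < pvInnerGo sb m i fuel j → pvMA sb m i t) ∧
     ¬ pvMA sb m i (pvInnerGo sb m i fuel j)) := by
  intro fuel
  induction fuel with
  | zero => intro j hf; omega
  | succ fuel IH =>
    intro j hf hj0 hj
    rw [pvInnerGo]
    split_ifs with h
    · exact IH (j + 1) (by omega) (by omega) (fun t ht htj => by
        by_cases he : t = j
        · subst he; exact h
        · exact hj t ht (by omega))
    · exact ⟨hj, h⟩

theorem pvInner_spec (sb : List Int) (m i j : Int) (hj0 : 0 ≤ j)
    (hj : ∀ t, 0 ≤ t → t < j → pvMA sb m i t) :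
    (∀ t, 0 ≤ t → t < pvInner sb m i j → pvMA sb m i t) ∧ ¬ pvMA sb m i (pvInner sb m i j) :=
  pvInnerGo_spec sb m i _ j (by omega) hj0 hj

theorem pvF_char (sb : List Int) (m i : Int) :
    (∀ t, 0 ≤ t → t < pvF sb m i → pvMA sb m i t) ∧ ¬ pvMA sb m i (pvF sb m i) :=
  pvInner_spec sb m i 0 le_rfl (by omega)

theorem pvF_nonneg (sb : List Int) (m i : Int) : 0 ≤ pvF sb m i := pvInner_ge sb m i 0

theorem pvF_unique (sb : List Int) (m i j : Int) (hj0 : 0 ≤ j)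
    (hj : ∀ t, 0 ≤ t → t < j → pvMA sb m i t) (hne : ¬ pvMA sb m i j) :
    pvF sb m i = j := by
  rcases lt_trichotomy (pvF sb m i) j with h | h | h
  · exact absurd (hj _ (pvF_nonneg sb m i) h) (pvF_char sb m i).2
  · exact h
  · exact absurd ((pvF_char sb m i).1 j hj0 h) hne

theorem pvInner_eq_pvF (sb : List Int) (m i j : Int) (hj0 : 0 ≤ j)
    (hj : ∀ t, 0 ≤ t → t < j → pvMA sb m i t) :
    pvInner sb m i j = pvF sb m i := by
  obtain ⟨h1, h2⟩ := pvInner_spec sb m i j hj0 hj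
  exact (pvF_unique sb m i (pvInner sb m i j) (le_trans hj0 (pvInner_ge sb m i j)) h1 h2).symm

theorem pvF_pos (sb : List Int) (m i : Int) (h0 : 0 ≤ i) (h1 : i < m) : 1 ≤ pvF sb m i := by
  have h := pvF_char sb m i
  have hM : pvMA sb m i 0 := ⟨by omega, by omega, by norm_num⟩
  have := pvF_nonneg sb m i
  by_contra hc
  have : pvF sb m i = 0 := by omega
  rw [this] at h
  exact h.2 hM

theorem pvF_bounds (sb : List Int) (m i : Int) (h0 : 0 ≤ i) (h1 : i < m) :
    pvF sb m i ≤ i + 1 ∧ pvF sb m i ≤ m - i := by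
  have hp := pvF_pos sb m i h0 h1
  have h := (pvF_char sb m i).1 (pvF sb m i - 1) (by omega) (by omega)
  unfold pvMA at h
  omega

theorem pvSym (sb : List Int) (m i j : Int)
    (hj : ∀ t, 0 ≤ t → t < j → pvMA sb m i t) (x : Int) (hx1 : -j < x) (hx2 : x < j) :
    pvGetI sb (i - x) = pvGetI sb (i + x) := by
  by_cases h : 0 ≤ x
  · exact (hj x h hx2).2.2
  · have := (hj (-x) (by omega) (by omega)).2.2
    rw [show i - -x = i + x by ring, show i + -x = i - x by ring] at this
    exact this.symm

theorem pvMirror (sb : List Int) (m i j : Int)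
    (hj : ∀ t, 0 ≤ t → t < j → pvMA sb m i t) (k t : Int)
    (hk : 0 ≤ k) (ht : 0 ≤ t) (hkt : k + t < j) :
    (pvMA sb m (i + k) t ↔ pvMA sb m (i - k) t) := by
  have hR := hj (k + t) (by omega) hkt
  have hr1 : 0 ≤ i - (k + t) := hR.1
  have hr2 : i + (k + t) < m := hR.2.1
  have e1 : pvGetI sb (i - (k - t)) = pvGetI sb (i + (k - t)) :=
    pvSym sb m i j hj (k - t) (by omega) (by omega)
  have e2 : pvGetI sb (i - (k + t)) = pvGetI sb (i + (k + t)) :=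
    pvSym sb m i j hj (k + t) (by omega) (by omega)
  unfold pvMA
  rw [show i + k - t = i + (k - t) by ring, show i + k + t = i + (k + t) by ring,
      show i - k - t = i - (k + t) by ring, show i - k + t = i - (k - t) by ring]
  rw [← e1, ← e2]
  constructor
  · rintro ⟨_, _, hq⟩; exact ⟨by omega, by omega, hq.symm⟩
  · rintro ⟨_, _, hq⟩; exact ⟨by omega, by omega, hq.symm⟩

theorem pvF_mirror (sb : List Int) (m i k : Int)
    (hk : 0 ≤ k) (hlt : k + pvF sb m (i - k) < pvF sb m i) :
    pvF sb m (i + k) = pvF sb m (i - k) := by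
  have hj := (pvF_char sb m i).1
  have t0nn := pvF_nonneg sb m (i - k)
  apply pvF_unique
  · exact t0nn
  · intro t ht htt
    exact (pvMirror sb m i _ hj k t hk ht (by omega)).2 ((pvF_char sb m (i - k)).1 t ht htt)
  · intro hMA
    exact (pvF_char sb m (i - k)).2 ((pvMirror sb m i _ hj k _ hk t0nn (by omega)).1 hMA)

-- ===== the copy ("mirror") loop =====
theorem pvCopyGo_spec (sb : List Int) (m i J : Int) :
    ∀ (fuel : Nat) (dp : List Int) (k : Int), (m - i - k).toNat < fuel →
    0 ≤ i → i < m → J = pvF sb m i → dp.length = m.toNat → 1 ≤ k → (k = 1 ∨ k + 1 ≤ J) →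
    (∀ p, 0 ≤ p → p < i + k → pvGetI dp p = pvF sb m p) →
    (((pvCopyGo m i J fuel dp k).1.length = m.toNat ∧ 1 ≤ (pvCopyGo m i J fuel dp k).2 ∧
     0 ≤ J - (pvCopyGo m i J fuel dp k).2 ∧
     (∀ p, 0 ≤ p → p < i + (pvCopyGo m i J fuel dp k).2 →
        pvGetI (pvCopyGo m i J fuel dp k).1 p = pvF sb m p) ∧
     (∀ t, 0 ≤ t → t < J - (pvCopyGo m i J fuel dp k).2 →
        pvMA sb m (i + (pvCopyGo m i J fuel dp k).2) t))) := by
  intro fuel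
  induction fuel with
  | zero => intro dp k hf; omega
  | succ fuel IH =>
    intro dp k hf hi0 him hJ hlen hk1 hkb hdp
    rw [pvCopyGo]
    split_ifs with h
    · have hfik : pvGetI dp (i - k) = pvF sb m (i - k) := hdp (i - k) (by omega) (by omega)
      have hfik1 : 1 ≤ pvF sb m (i - k) := pvF_pos sb m (i - k) (by omega) (by omega)
      have hlt : k + pvF sb m (i - k) < J := by rw [← hfik]; exact h.2.2
      have hmir : pvGetI dp (i - k) = pvF sb m (i + k) := by
        rw [hfik, pvF_mirror sb m i k (by omega) (by rw [← hJ]; exact hlt)]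
      apply IH
      · omega
      · exact hi0
      · exact him
      · exact hJ
      · rw [pvSetI_length]; exact hlen
      · omega
      · omega
      · intro p hp0 hpk
        by_cases he : p = i + k
        · subst he
          rw [hmir, pvGetI_set_self _ _ _ (by omega) (by omega)]
        · rw [pvGetI_set_ne _ _ _ _ (by omega) hp0 he]
          exact hdp p hp0 (by omega)
    · have hF1 : 1 ≤ pvF sb m i := pvF_pos sb m i hi0 him
      have hFb := pvF_bounds sb m i hi0 him
      refine ⟨hlen, by omega, by omega, hdp, ?_⟩
      intro t ht0 htJ
      by_cases h1 : 0 ≤ i - k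
      · by_cases h2 : i + k < m
        · have h3 : J ≤ k + pvGetI dp (i - k) := by
            rcases not_and_or.mp h with hx | hx
            · omega
            · rcases not_and_or.mp hx with hy | hy
              · omega
              · omega
          have hfik : pvGetI dp (i - k) = pvF sb m (i - k) := hdp (i - k) (by omega) (by omega)
          have hMt : pvMA sb m (i - k) t :=
            (pvF_char sb m (i - k)).1 t ht0 (by omega)
          exact (pvMirror sb m i (pvF sb m i) (pvF_char sb m i).1 k t (by omega) ht0
            (by omega)).2 hMt
        · omega
      · omega

theorem pvCopy_spec (sb : List Int) (m i J : Int) (dp : List Int) (k : Int) :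
    0 ≤ i → i < m → J = pvF sb m i → dp.length = m.toNat → 1 ≤ k → (k = 1 ∨ k + 1 ≤ J) →
    (∀ p, 0 ≤ p → p < i + k → pvGetI dp p = pvF sb m p) →
    ((pvCopy m i J dp k).1.length = m.toNat ∧ 1 ≤ (pvCopy m i J dp k).2 ∧
     0 ≤ J - (pvCopy m i J dp k).2 ∧
     (∀ p, 0 ≤ p → p < i + (pvCopy m i J dp k).2 → pvGetI (pvCopy m i J dp k).1 p = pvF sb m p) ∧
     (∀ t, 0 ≤ t → t < J - (pvCopy m i J dp k).2 → pvMA sb m (i + (pvCopy m i J dp k).2) t)) :=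
  pvCopyGo_spec sb m i J _ dp k (by omega)

-- ===== the outer Manacher loop =====
theorem pvOuterGo_spec (sb : List Int) (m : Int) : ∀ (fuel : Nat) (dp : List Int) (i j : Int),
    (m - i).toNat < fuel → 0 ≤ i → 0 ≤ j → dp.length = m.toNat →
    (∀ p, 0 ≤ p → p < i → pvGetI dp p = pvF sb m p) →
    (∀ t, 0 ≤ t → t < j → pvMA sb m i t) →
    ((pvOuterGo sb m fuel dp i j).length = m.toNat ∧
     ∀ p, 0 ≤ p → p < m → pvGetI (pvOuterGo sb m fuel dp i j) p = pvF sb m p) := by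
  intro fuel
  induction fuel with
  | zero => intro dp i j hf; omega
  | succ fuel IH =>
    intro dp i j hf hi0 hj0 hlen hdp hM
    rw [pvOuterGo]
    split_ifs with h
    · have hj1 : pvInner sb m i j = pvF sb m i := pvInner_eq_pvF sb m i j hj0 hM
      have hdp1 : ∀ p, 0 ≤ p → p < i + 1 →
          pvGetI (pvSetI dp i (pvInner sb m i j)) p = pvF sb m p := by
        intro p hp0 hp1
        by_cases he : p = i
        · subst he; rw [pvGetI_set_self _ _ _ hp0 (by omega), hj1]
        · rw [pvGetI_set_ne _ _ _ _ hi0 hp0 he]; exact hdp p hp0 (by omega)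
      have hcopy := pvCopy_spec sb m i (pvInner sb m i j) (pvSetI dp i (pvInner sb m i j)) 1
        hi0 h hj1 (by rw [pvSetI_length]; exact hlen) le_rfl (Or.inl rfl) hdp1
      have hk1 := hcopy.2.1
      exact IH _ _ _ (by omega) (by omega) (by omega) hcopy.1 hcopy.2.2.2.1 hcopy.2.2.2.2
    · exact ⟨hlen, fun p hp0 hpm => hdp p hp0 (by omega)⟩

theorem pvOuter_final (sb : List Int) (m : Int)
    (dp : List Int) (hlen : dp.length = m.toNat) :
    ((pvOuter sb m dp 0 0).length = m.toNat ∧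
     ∀ p, 0 ≤ p → p < m → pvGetI (pvOuter sb m dp 0 0) p = pvF sb m p) :=
  pvOuterGo_spec sb m ((m - 0).toNat + 1) dp 0 0 (by omega) le_rfl le_rfl hlen
    (fun p hp0 hpm => by omega) (fun t ht0 htj => by omega)

-- ===== construction of sb (the INF-interleaved array) =====
theorem pvSb1_spec (ords : List Int) (m : Int) : ∀ (K : Nat) (a : Int) (sb : List Int),
    (a + 1).toNat ≤ K → 2 * a < m → sb.length = m.toNat →
    (((PySem.List.pyRange a (-1) (-1)).foldl
        (fun sb i => pvSetI sb (i * 2) (pvGetI ords i)) sb).length = m.toNat ∧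
     ∀ p, 0 ≤ p → p < m →
       pvGetI ((PySem.List.pyRange a (-1) (-1)).foldl
          (fun sb i => pvSetI sb (i * 2) (pvGetI ords i)) sb) p =
       if p % 2 = 0 ∧ p ≤ 2 * a then pvGetI ords (p / 2) else pvGetI sb p) := by
  intro K
  induction K with
  | zero =>
    intro a sb hK ha hlen
    have hnil : PySem.List.pyRange a (-1) (-1) = [] := by
      simp [PySem.List.pyRange]
      omega
    rw [hnil]; simp only [List.foldl_nil]
    refine ⟨hlen, fun p hp0 hpm => ?_⟩
    rw [if_neg (by omega)]
  | succ K IH =>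
    intro a sb hK ha hlen
    by_cases h : (-1 : Int) < a
    · rw [PySem.List.pyRange_neg_one_cons h]
      simp only [List.foldl_cons]
      obtain ⟨ihlen, ihget⟩ := IH (a - 1) (pvSetI sb (a * 2) (pvGetI ords a))
        (by omega) (by omega) (by rw [pvSetI_length]; exact hlen)
      refine ⟨ihlen, fun p hp0 hpm => ?_⟩
      rw [ihget p hp0 hpm]
      by_cases he : p = a * 2
      · rw [if_neg (by omega), if_pos (by omega), he,
            pvGetI_set_self _ _ _ (by omega) (by omega)]
        rw [Int.mul_ediv_cancel _ (by norm_num)]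
      · by_cases hc : p % 2 = 0 ∧ p ≤ 2 * (a - 1)
        · rw [if_pos hc, if_pos (by omega)]
        · rw [if_neg hc, if_neg (by omega), pvGetI_set_ne _ _ _ _ (by omega) hp0 (by omega)]
    · have hnil : PySem.List.pyRange a (-1) (-1) = [] := by
        simp [PySem.List.pyRange]
        omega
      rw [hnil]; simp only [List.foldl_nil]
      refine ⟨hlen, fun p hp0 hpm => ?_⟩
      rw [if_neg (by omega)]

theorem pvSb2_spec (n m : Int) : ∀ (K : Nat) (a : Int) (sb : List Int),
    (n - 1 - a).toNat ≤ K → 0 ≤ a → m = n * 2 - 1 → sb.length = m.toNat →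
    (((PySem.List.pyRange a (n - 1) 1).foldl
        (fun sb i => pvSetI sb (i * 2 + 1) pvINF) sb).length = m.toNat ∧
     ∀ p, 0 ≤ p → p < m →
       pvGetI ((PySem.List.pyRange a (n - 1) 1).foldl
          (fun sb i => pvSetI sb (i * 2 + 1) pvINF) sb) p =
       if p % 2 = 1 ∧ 2 * a + 1 ≤ p then pvINF else pvGetI sb p) := by
  intro K
  induction K with
  | zero =>
    intro a sb hK ha hm hlen
    have hnil : PySem.List.pyRange a (n - 1) 1 = [] := by
      simp [PySem.List.pyRange]
      omega
    rw [hnil]; simp only [List.foldl_nil]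
    refine ⟨hlen, fun p hp0 hpm => ?_⟩
    rw [if_neg (by omega)]
  | succ K IH =>
    intro a sb hK ha hm hlen
    by_cases h : a < n - 1
    · rw [PySem.List.pyRange_one_cons h]
      simp only [List.foldl_cons]
      obtain ⟨ihlen, ihget⟩ := IH (a + 1) (pvSetI sb (a * 2 + 1) pvINF)
        (by omega) (by omega) hm (by rw [pvSetI_length]; exact hlen)
      refine ⟨ihlen, fun p hp0 hpm => ?_⟩
      rw [ihget p hp0 hpm]
      by_cases he : p = a * 2 + 1
      · rw [if_neg (by omega), if_pos (by omega), he,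
            pvGetI_set_self _ _ _ (by omega) (by omega)]
      · by_cases hc : p % 2 = 1 ∧ 2 * (a + 1) + 1 ≤ p
        · rw [if_pos hc, if_pos (by omega)]
        · rw [if_neg hc, if_neg (by omega), pvGetI_set_ne _ _ _ _ (by omega) hp0 (by omega)]
    · have hnil : PySem.List.pyRange a (n - 1) 1 = [] := by
        simp [PySem.List.pyRange]
        omega
      rw [hnil]; simp only [List.foldl_nil]
      refine ⟨hlen, fun p hp0 hpm => ?_⟩
      rw [if_neg (by omega)]

theorem pvSbFull (ords : List Int) (n m : Int) (hn : n = (ords.length : Int))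
    (hm : m = n * 2 - 1) (h1 : 1 ≤ n) :
    (((PySem.List.pyRange 0 (n - 1) 1).foldl (fun sb i => pvSetI sb (i * 2 + 1) pvINF)
        ((PySem.List.pyRange (n - 1) (-1) (-1)).foldl
          (fun sb i => pvSetI sb (i * 2) (pvGetI ords i)) (List.replicate m.toNat 0))).length
       = m.toNat ∧
     ∀ p, 0 ≤ p → p < m →
       pvGetI ((PySem.List.pyRange 0 (n - 1) 1).foldl (fun sb i => pvSetI sb (i * 2 + 1) pvINF)
        ((PySem.List.pyRange (n - 1) (-1) (-1)).foldl
          (fun sb i => pvSetI sb (i * 2) (pvGetI ords i)) (List.replicate m.toNat 0))) p =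
       if p % 2 = 0 then pvGetI ords (p / 2) else pvINF) := by
  obtain ⟨l1, g1⟩ := pvSb1_spec ords m n.toNat (n - 1) (List.replicate m.toNat 0)
    (by omega) (by omega) (by simp)
  obtain ⟨l2, g2⟩ := pvSb2_spec n m n.toNat 0
    ((PySem.List.pyRange (n - 1) (-1) (-1)).foldl
      (fun sb i => pvSetI sb (i * 2) (pvGetI ords i)) (List.replicate m.toNat 0))
    (by omega) le_rfl hm l1
  refine ⟨l2, fun p hp0 hpm => ?_⟩
  rw [g2 p hp0 hpm]
  by_cases he : p % 2 = 0
  · rw [if_neg (by omega), if_pos he, g1 p hp0 hpm, if_pos (by omega)]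
  · rw [if_pos (by omega), if_neg he]

-- ===== parity of (i ^ dp[i]) & 1 =====
theorem pvParity (a b : Int) (h0 : 0 ≤ a) (h1 : 0 ≤ b) :
    (PySem.Int.band (PySem.Int.bxor a b) 1 = 0 ↔ a % 2 = b % 2) := by
  rw [PySem.Int.bxor_of_nonneg h0 h1]
  rw [show (1:Int) = ((1:Nat):Int) by norm_num, PySem.Int.band_natCast]
  rw [Nat.and_one_is_mod, Nat.xor_mod_two_eq]
  omega

-- adjusted radius: the final value Manacher's post-processing leaves at center p
def pvAdj (sb : List Int) (m p : Int) : Int :=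
  if (p - pvF sb m p) % 2 = 0 then pvF sb m p - 1 else pvF sb m p

theorem pvAdj_nonneg (sb : List Int) (m p : Int) (h0 : 0 ≤ p) (h1 : p < m) :
    0 ≤ pvAdj sb m p := by
  have := pvF_pos sb m p h0 h1
  unfold pvAdj
  split_ifs <;> omega

theorem pvAdj_parity (sb : List Int) (m p : Int) :
    (p - pvAdj sb m p) % 2 ≠ 0 := by
  unfold pvAdj
  split_ifs with hx <;> omega

-- ===== the parity-adjustment loop =====
theorem pvAdjust_spec (sb : List Int) (m : Int) : ∀ (K : Nat) (a : Int) (dp : List Int),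
    (m - a).toNat ≤ K → 0 ≤ a → dp.length = m.toNat →
    (∀ p, 0 ≤ p → p < m → pvGetI dp p = if p < a then pvAdj sb m p else pvF sb m p) →
    (((PySem.List.pyRange a m 1).foldl
        (fun dp i => if PySem.Int.band (PySem.Int.bxor i (pvGetI dp i)) 1 = 0 then
                       pvSetI dp i (pvGetI dp i - 1) else dp) dp).length = m.toNat ∧
     ∀ p, 0 ≤ p → p < m →
       pvGetI ((PySem.List.pyRange a m 1).foldl
        (fun dp i => if PySem.Int.band (PySem.Int.bxor i (pvGetI dp i)) 1 = 0 then
                       pvSetI dp i (pvGetI dp i - 1) else dp) dp) p = pvAdj sb m p) := by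
  intro K
  induction K with
  | zero =>
    intro a dp hK ha hlen hdp
    have hnil : PySem.List.pyRange a m 1 = [] := by
      simp [PySem.List.pyRange]; omega
    rw [hnil]; simp only [List.foldl_nil]
    exact ⟨hlen, fun p hp0 hpm => by rw [hdp p hp0 hpm, if_pos (by omega)]⟩
  | succ K IH =>
    intro a dp hK ha hlen hdp
    by_cases h : a < m
    · rw [PySem.List.pyRange_one_cons h]
      simp only [List.foldl_cons]
      have hda : pvGetI dp a = pvF sb m a := by
        rw [hdp a ha h, if_neg (by omega)]
      have hF0 : 0 ≤ pvF sb m a := pvF_nonneg sb m a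
      have hpar := pvParity a (pvGetI dp a) ha (by omega)
      rw [hda] at hpar
      rw [hda]
      by_cases hc : PySem.Int.band (PySem.Int.bxor a (pvF sb m a)) 1 = 0
      · rw [if_pos hc]
        apply IH (a + 1) _ (by omega) (by omega) (by rw [pvSetI_length]; exact hlen)
        intro p hp0 hpm
        by_cases he : p = a
        · subst he
          rw [pvGetI_set_self _ _ _ hp0 (by omega), if_pos (by omega), pvAdj,
              if_pos (by omega)]
        · rw [pvGetI_set_ne _ _ _ _ ha hp0 he, hdp p hp0 hpm]
          by_cases hlt : p < a
          · rw [if_pos hlt, if_pos (by omega)]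
          · rw [if_neg hlt, if_neg (by omega)]
      · rw [if_neg hc]
        apply IH (a + 1) _ (by omega) (by omega) hlen
        intro p hp0 hpm
        rw [hdp p hp0 hpm]
        by_cases he : p = a
        · subst he
          rw [if_neg (by omega), if_pos (by omega), pvAdj, if_neg (by omega)]
        · by_cases hlt : p < a
          · rw [if_pos hlt, if_pos (by omega)]
          · rw [if_neg (by omega), if_neg (by omega)]
    · have hnil : PySem.List.pyRange a m 1 = [] := by
        simp [PySem.List.pyRange]; omega
      rw [hnil]; simp only [List.foldl_nil]
      exact ⟨hlen, fun p hp0 hpm => by rw [hdp p hp0 hpm, if_pos (by omega)]⟩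

-- ===== interval collection + write-back =====
theorem pvAssemble_spec (sb : List Int) (m : Int) (dp2 : List Int)
    (hdp2 : ∀ p, 0 ≤ p → p < m → pvGetI dp2 p = pvAdj sb m p) :
    ∀ (K : Nat) (a : Int) (res : List Int),
    (m - a).toNat ≤ K → 0 ≤ a → res.length = m.toNat →
    (∀ p, 0 ≤ p → p < m → pvGetI res p = if p < a then pvAdj sb m p else 0) →
    ((((PySem.List.pyRange a m 1).flatMap
        (fun i => if pvGetI dp2 i = 0 then [] else
          [(PySem.Int.floordiv (i - pvGetI dp2 i + 1) 2,
            PySem.Int.floordiv (i + pvGetI dp2 i + 1) 2)])).foldl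
        (fun res p => pvSetI res (p.1 + p.2 - 1) (p.2 - p.1)) res).length = m.toNat ∧
     ∀ p, 0 ≤ p → p < m →
       pvGetI (((PySem.List.pyRange a m 1).flatMap
        (fun i => if pvGetI dp2 i = 0 then [] else
          [(PySem.Int.floordiv (i - pvGetI dp2 i + 1) 2,
            PySem.Int.floordiv (i + pvGetI dp2 i + 1) 2)])).foldl
        (fun res p => pvSetI res (p.1 + p.2 - 1) (p.2 - p.1)) res) p = pvAdj sb m p) := by
  intro K
  induction K with
  | zero =>
    intro a res hK ha hlen hres
    have hnil : PySem.List.pyRange a m 1 = [] := by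
      simp [PySem.List.pyRange]; omega
    rw [hnil]; simp only [List.flatMap_nil, List.foldl_nil]
    exact ⟨hlen, fun p hp0 hpm => by rw [hres p hp0 hpm, if_pos (by omega)]⟩
  | succ K IH =>
    intro a res hK ha hlen hres
    by_cases h : a < m
    · rw [PySem.List.pyRange_one_cons h]
      simp only [List.flatMap_cons, List.foldl_append]
      have hda : pvGetI dp2 a = pvAdj sb m a := hdp2 a ha h
      by_cases hz : pvGetI dp2 a = 0
      · rw [if_pos hz]
        simp only [List.foldl_nil]
        apply IH (a + 1) res (by omega) (by omega) hlen
        intro p hp0 hpm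
        rw [hres p hp0 hpm]
        by_cases he : p = a
        · subst he; rw [if_neg (by omega), if_pos (by omega), ← hda, hz]
        · by_cases hlt : p < a
          · rw [if_pos hlt, if_pos (by omega)]
          · rw [if_neg hlt, if_neg (by omega)]
      · rw [if_neg hz]
        simp only [List.foldl_cons, List.foldl_nil]
        have hd1 : 1 ≤ pvAdj sb m a := by
          have := pvAdj_nonneg sb m a ha h
          rw [hda] at hz
          omega
        have hdF : pvAdj sb m a ≤ pvF sb m a := by
          unfold pvAdj; split_ifs <;> omega
        have hFb := pvF_bounds sb m a ha h
        have hpar := pvAdj_parity sb m a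
        have hmod : (a - pvAdj sb m a) % 2 = 1 := by omega
        have h2s : 2 * ((a - pvAdj sb m a + 1) / 2) = a - pvAdj sb m a + 1 := by omega
        have h2e : 2 * ((a + pvAdj sb m a + 1) / 2) = a + pvAdj sb m a + 1 := by omega
        have hfd1 : PySem.Int.floordiv (a - pvGetI dp2 a + 1) 2 = (a - pvAdj sb m a + 1) / 2 := by
          rw [hda, PySem.Int.floordiv_eq_ediv_of_pos (by norm_num)]
        have hfd2 : PySem.Int.floordiv (a + pvGetI dp2 a + 1) 2 = (a + pvAdj sb m a + 1) / 2 := by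
          rw [hda, PySem.Int.floordiv_eq_ediv_of_pos (by norm_num)]
        rw [hfd1, hfd2]
        have hidx : (a - pvAdj sb m a + 1) / 2 + (a + pvAdj sb m a + 1) / 2 - 1 = a := by omega
        have hval : (a + pvAdj sb m a + 1) / 2 - (a - pvAdj sb m a + 1) / 2 = pvAdj sb m a := by
          omega
        simp only [hidx, hval]
        apply IH (a + 1) _ (by omega) (by omega) (by rw [pvSetI_length]; exact hlen)
        intro p hp0 hpm
        by_cases he : p = a
        · subst he
          rw [pvGetI_set_self _ _ _ hp0 (by omega), if_pos (by omega)]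
        · rw [pvGetI_set_ne _ _ _ _ ha hp0 he, hres p hp0 hpm]
          by_cases hlt : p < a
          · rw [if_pos hlt, if_pos (by omega)]
          · rw [if_neg hlt, if_neg (by omega)]
    · have hnil : PySem.List.pyRange a m 1 = [] := by
        simp [PySem.List.pyRange]; omega
      rw [hnil]; simp only [List.flatMap_nil, List.foldl_nil]
      exact ⟨hlen, fun p hp0 hpm => by rw [hres p hp0 hpm, if_pos (by omega)]⟩

-- ===== B side: naive expansion computes the adjusted radius =====
theorem pvGuardIff (ords sb : List Int) (n m : Int) (hn : n = (ords.length : Int))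
    (hm : m = n * 2 - 1)
    (hsb : ∀ p, 0 ≤ p → p < m → pvGetI sb p = if p % 2 = 0 then pvGetI ords (p / 2) else pvINF)
    (l r : Int) (hge : l ≤ r) :
    ((0 ≤ l ∧ r < n ∧ pvGetI ords l = pvGetI ords r) ↔ pvMA sb m (l + r) (r - l)) := by
  have e1 : l + r - (r - l) = 2 * l := by ring
  have e2 : l + r + (r - l) = 2 * r := by ring
  unfold pvMA
  rw [e1, e2]
  constructor
  · rintro ⟨h1, h2, h3⟩
    refine ⟨by omega, by omega, ?_⟩
    rw [hsb (2 * l) (by omega) (by omega), hsb (2 * r) (by omega) (by omega),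
        if_pos (by omega), if_pos (by omega),
        Int.mul_ediv_cancel_left _ (by norm_num), Int.mul_ediv_cancel_left _ (by norm_num)]
    exact h3
  · rintro ⟨h1, h2, h3⟩
    refine ⟨by omega, by omega, ?_⟩
    rw [hsb (2 * l) (by omega) (by omega), hsb (2 * r) (by omega) (by omega),
        if_pos (by omega), if_pos (by omega),
        Int.mul_ediv_cancel_left _ (by norm_num), Int.mul_ediv_cancel_left _ (by norm_num)] at h3
    exact h3

theorem pvExpandGo_spec (ords sb : List Int) (n m : Int) (hn : n = (ords.length : Int))
    (hm : m = n * 2 - 1)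
    (hsb : ∀ p, 0 ≤ p → p < m → pvGetI sb p = if p % 2 = 0 then pvGetI ords (p / 2) else pvINF)
    (c : Int) (hc0 : 0 ≤ c) (hc1 : c < m) :
    ∀ (fuel : Nat) (l r : Int), (l + 1).toNat < fuel →
    l + r = c → 0 ≤ r - l → r - l ≤ pvF sb m c + 1 →
    (r - l = pvF sb m c + 1 → (c - pvF sb m c) % 2 ≠ 0) →
    pvExpandGo ords n fuel l r = pvAdj sb m c := by
  have hF1 : 1 ≤ pvF sb m c := pvF_pos sb m c hc0 hc1
  intro fuel
  induction fuel with
  | zero => intro l r hf; omega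
  | succ fuel IH =>
    intro l r hf hlr ht0 htF hside
    have hgi := pvGuardIff ords sb n m hn hm hsb l r (by omega)
    rw [hlr] at hgi
    rw [pvExpandGo]
    by_cases hlt : r - l ≤ pvF sb m c - 1
    · have hM : pvMA sb m c (r - l) := (pvF_char sb m c).1 (r - l) ht0 (by omega)
      have hg := hgi.2 hM
      rw [if_pos hg]
      apply IH (l - 1) (r + 1) (by omega) (by omega) (by omega) (by omega)
      intro hF2
      omega
    · by_cases heq : r - l = pvF sb m c
      · have hnM : ¬ pvMA sb m c (r - l) := by rw [heq]; exact (pvF_char sb m c).2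
        rw [if_neg (fun hg => hnM (hgi.1 hg))]
        have heven : (c - (r - l)) % 2 = 0 := by omega
        unfold pvAdj
        rw [if_pos (by omega)]
        omega
      · have heq1 : r - l = pvF sb m c + 1 := by omega
        have hodd : (c - pvF sb m c) % 2 ≠ 0 := hside heq1
        have hnM : ¬ (0 ≤ c - pvF sb m c ∧ c + pvF sb m c < m) := by
          rintro ⟨hr1, hr2⟩
          apply (pvF_char sb m c).2
          refine ⟨hr1, hr2, ?_⟩
          rw [hsb (c - pvF sb m c) (by omega) (by omega),
              hsb (c + pvF sb m c) (by omega) (by omega),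
              if_neg (by omega), if_neg (by omega)]
        have hnM1 : ¬ pvMA sb m c (r - l) := by
          rintro ⟨a1, a2, _⟩
          omega
        rw [if_neg (fun hg => hnM1 (hgi.1 hg))]
        unfold pvAdj
        rw [if_neg hodd]
        omega

theorem pvAltElem (ords sb : List Int) (n m : Int) (hn : n = (ords.length : Int))
    (hm : m = n * 2 - 1)
    (hsb : ∀ p, 0 ≤ p → p < m → pvGetI sb p = if p % 2 = 0 then pvGetI ords (p / 2) else pvINF)
    (c : Int) (hc0 : 0 ≤ c) (hc1 : c < m) :
    (if PySem.Int.mod c 2 = 0 then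
       pvExpand ords n (PySem.Int.floordiv c 2) (PySem.Int.floordiv c 2)
     else
       pvExpand ords n (PySem.Int.floordiv c 2) (PySem.Int.floordiv c 2 + 1)) = pvAdj sb m c := by
  have hF1 : 1 ≤ pvF sb m c := pvF_pos sb m c hc0 hc1
  have hmod : PySem.Int.mod c 2 = c % 2 := PySem.Int.mod_eq_emod_of_pos (by norm_num)
  have hfd : PySem.Int.floordiv c 2 = c / 2 := PySem.Int.floordiv_eq_ediv_of_pos (by norm_num)
  by_cases hpar : c % 2 = 0
  · rw [if_pos (by rw [hmod]; exact hpar), hfd]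
    exact pvExpandGo_spec ords sb n m hn hm hsb c hc0 hc1 ((c / 2 + 1).toNat + 1) (c / 2) (c / 2)
      (by omega) (by omega) (by omega) (by omega) (by omega)
  · rw [if_neg (by rw [hmod]; exact hpar), hfd]
    exact pvExpandGo_spec ords sb n m hn hm hsb c hc0 hc1 ((c / 2 + 1).toNat + 1) (c / 2) (c / 2 + 1)
      (by omega) (by omega) (by omega) (by omega) (by omega)

-- ===== final assembly =====
theorem pvGetI_replicate (k : Nat) (p : Int) (h0 : 0 ≤ p) (h1 : p < (k : Int)) :
    pvGetI (List.replicate k (0 : Int)) p = 0 := by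
  rw [pvGetI_pos _ _ h0 (by simp; omega)]
  rw [List.getElem?_replicate, if_pos (by omega)]
  rfl

theorem pvMain (ords : List Int) (hn1 : 1 ≤ (ords.length : Int)) :
    longestPalindromesLength ords = longestPalindromesLength_alt ords := by
  have hmof : pvMOf ords = (ords.length : Int) * 2 - 1 := by simp only [pvMOf, pvNOf]
  have hnof : pvNOf ords = (ords.length : Int) := rfl
  -- sb facts
  have hsb0 := pvSbFull ords (ords.length : Int) ((ords.length : Int) * 2 - 1) rfl rfl hn1
  have hsbl : (pvSbOf ords).length = ((ords.length : Int) * 2 - 1).toNat := by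
    simp only [pvSbOf, pvNOf, pvMOf]; exact hsb0.1
  have hsbg : ∀ p, 0 ≤ p → p < (ords.length : Int) * 2 - 1 →
      pvGetI (pvSbOf ords) p =
        if p % 2 = 0 then pvGetI ords (p / 2) else pvINF := by
    intro p h0 h1
    have := hsb0.2 p h0 h1
    simp only [pvSbOf, pvNOf, pvMOf]
    exact this
  -- dp facts
  have hdp0 := pvOuter_final (pvSbOf ords) ((ords.length : Int) * 2 - 1)
    (List.replicate ((ords.length : Int) * 2 - 1).toNat 0) (by simp)
  have hdpof : pvDpOf ords =
      pvOuter (pvSbOf ords) ((ords.length : Int) * 2 - 1)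
        (List.replicate ((ords.length : Int) * 2 - 1).toNat 0) 0 0 := by
    simp only [pvDpOf, hmof]
  -- dp2 facts
  have hdp2 := pvAdjust_spec (pvSbOf ords) ((ords.length : Int) * 2 - 1)
    ((ords.length : Int) * 2 - 1).toNat 0 (pvDpOf ords) (by omega) le_rfl
    (by rw [hdpof]; exact hdp0.1)
    (by intro p h0 h1
        rw [if_neg (by omega), hdpof]
        exact hdp0.2 p h0 h1)
  have hdp2of : pvDp2Of ords =
      (PySem.List.pyRange 0 ((ords.length : Int) * 2 - 1) 1).foldl
        (fun dp i => if PySem.Int.band (PySem.Int.bxor i (pvGetI dp i)) 1 = 0 then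
                       pvSetI dp i (pvGetI dp i - 1) else dp) (pvDpOf ords) := by
    simp only [pvDp2Of, hmof]
  have hdp2g : ∀ p, 0 ≤ p → p < (ords.length : Int) * 2 - 1 →
      pvGetI (pvDp2Of ords) p = pvAdj (pvSbOf ords) ((ords.length : Int) * 2 - 1) p := by
    intro p h0 h1
    rw [hdp2of]
    exact hdp2.2 p h0 h1
  -- the palindromes list as a flatMap
  have hpal : longestPalindromes ords =
      (PySem.List.pyRange 0 ((ords.length : Int) * 2 - 1) 1).flatMap
        (fun i => if pvGetI (pvDp2Of ords) i = 0 then [] else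
          [(PySem.Int.floordiv (i - pvGetI (pvDp2Of ords) i + 1) 2,
            PySem.Int.floordiv (i + pvGetI (pvDp2Of ords) i + 1) 2)]) := by
    simp only [longestPalindromes, hmof]
    rw [show (fun (res : List (Int × Int)) i =>
          if pvGetI (pvDp2Of ords) i = 0 then res
          else res ++ [(PySem.Int.floordiv (i - pvGetI (pvDp2Of ords) i + 1) 2,
                        PySem.Int.floordiv (i + pvGetI (pvDp2Of ords) i + 1) 2)]) =
        (fun (res : List (Int × Int)) i =>
          res ++ (if pvGetI (pvDp2Of ords) i = 0 then [] else
            [(PySem.Int.floordiv (i - pvGetI (pvDp2Of ords) i + 1) 2,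
              PySem.Int.floordiv (i + pvGetI (pvDp2Of ords) i + 1) 2)])) from by
      funext res i; split_ifs <;> simp]
    rw [PySem.List.foldl_append_eq_flatMap]
    simp
  -- the written result
  have hasm := pvAssemble_spec (pvSbOf ords) ((ords.length : Int) * 2 - 1) (pvDp2Of ords) hdp2g
    ((ords.length : Int) * 2 - 1).toNat 0
    (List.replicate (2 * pvNOf ords - 1).toNat 0) (by omega) le_rfl
    (by rw [hnof]; simp; omega)
    (by intro p h0 h1
        rw [if_neg (by omega)]
        exact pvGetI_replicate _ p h0 (by rw [hnof]; omega))
  have hA : longestPalindromesLength ords =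
      ((PySem.List.pyRange 0 ((ords.length : Int) * 2 - 1) 1).flatMap
        (fun i => if pvGetI (pvDp2Of ords) i = 0 then [] else
          [(PySem.Int.floordiv (i - pvGetI (pvDp2Of ords) i + 1) 2,
            PySem.Int.floordiv (i + pvGetI (pvDp2Of ords) i + 1) 2)])).foldl
        (fun res p => pvSetI res (p.1 + p.2 - 1) (p.2 - p.1))
        (List.replicate (2 * pvNOf ords - 1).toNat 0) := by
    rw [longestPalindromesLength, hpal]
  -- B as a map
  have hB : longestPalindromesLength_alt ords =
      List.map (fun c => if PySem.Int.mod c 2 = 0 then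
                 pvExpand ords (ords.length : Int) (PySem.Int.floordiv c 2) (PySem.Int.floordiv c 2)
               else
                 pvExpand ords (ords.length : Int) (PySem.Int.floordiv c 2)
                   (PySem.Int.floordiv c 2 + 1))
        (PySem.List.pyRange 0 (2 * (ords.length : Int) - 1) 1) := by
    simp only [longestPalindromesLength_alt]
    rw [PySem.List.foldl_append_singleton_eq_map]
    simp
  rw [hA, hB]
  have hrng : PySem.List.pyRange 0 (2 * (ords.length : Int) - 1) 1 =
      List.map (fun k : Nat => (k : Int)) (List.range ((ords.length : Int) * 2 - 1).toNat) := by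
    rw [show (2 * (ords.length : Int) - 1) =
        ((((ords.length : Int) * 2 - 1).toNat : Nat) : Int) by omega]
    exact PySem.List.pyRange_zero_natCast _
  rw [hrng, List.map_map]
  have hlen := hasm.1
  apply List.ext_getElem
  · rw [hlen, List.length_map, List.length_range]
  · intro i h1 h2
    have hi : (i : Int) < (ords.length : Int) * 2 - 1 := by
      rw [hlen] at h1; omega
    rw [List.getElem_map, List.getElem_range]
    have h3 := hasm.2 (i : Int) (by omega) hi
    rw [pvGetI_pos _ _ (by omega) (by rw [hlen]; omega)] at h3
    rw [Int.toNat_natCast] at h3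
    rw [List.getElem?_eq_getElem (by rw [hlen]; omega)] at h3
    rw [Option.getD_some] at h3
    rw [h3]
    exact (pvAltElem ords (pvSbOf ords) (ords.length : Int) ((ords.length : Int) * 2 - 1)
      rfl rfl hsbg (i : Int) (by omega) hi).symm

-- ===== VERDICT (by name: the statement is the Claim_ definition above) =====
theorem longestPalindromesLength_spec : Claim_equal_longestPalindromesLength := by
  intro ords _
  unfold Spec_longestPalindromesLength
  by_cases h : 1 ≤ (ords.length : Int)
  · exact pvMain ords h
  · have hnil : ords = [] := by
      cases ords with
      | nil => rfl
      | cons x xs => simp at h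
    subst hnil
    rfl
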